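-- pv_equiv track=rewrite | github.com/QuachTinh68/LessonCode | Python/Demo/HowKteam/064.py | ReMax
-- ===== SOURCE A (Python) =====
-- def ReMax(s):
--     new=s.split()
--     max=''
--     for i in new:
--         if len(i) > len(max):
--             max=i
--         elif len(i) == len(max):
--             if i < max:
--                 max=i
--             else:
--                 max=max
--     return max
-- ===== SOURCE B (Python) =====
-- def ReMax(s):
--     words = s.split()
--     if not words:
--         return ''
--     return sorted(words, key=lambda w: (-len(w), w))[0]
-- ===== Notes on version B (the rewrite author's own statement) =====
-- stated objective: idiomatic
-- what changed: Replaces the manual argmax scan with three-way branching by sort-then-select: sort the words by the composite key (-len(w), w) and take the first.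
import Mathlib
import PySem

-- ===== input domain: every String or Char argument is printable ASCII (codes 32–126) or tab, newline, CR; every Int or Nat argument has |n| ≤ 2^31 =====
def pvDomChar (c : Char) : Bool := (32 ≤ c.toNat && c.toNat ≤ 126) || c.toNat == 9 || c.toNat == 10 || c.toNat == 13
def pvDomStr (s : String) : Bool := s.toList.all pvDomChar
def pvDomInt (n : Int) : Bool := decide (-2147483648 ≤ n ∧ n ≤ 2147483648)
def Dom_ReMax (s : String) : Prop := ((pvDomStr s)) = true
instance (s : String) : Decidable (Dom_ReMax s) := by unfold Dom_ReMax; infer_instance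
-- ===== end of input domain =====

-- B replaces A's manual argmax scan by sorting the words with key (-len(w), w) and taking the first (idiomatic, not faster).

-- ===== PORT A =====
def ReMax (s : String) : String :=
  (PySem.Str.split₀ s).foldl
    (fun mx i =>
      if PySem.Str.len i > PySem.Str.len mx then i
      else if PySem.Str.len i = PySem.Str.len mx then
        (if i < mx then i else mx)
      else mx) ""

-- ===== PORT B =====
def ReMax_alt (s : String) : String :=
  let words := PySem.Str.split₀ s
  if words = [] then ""
  else
    match PySem.List.sorted2 words (fun w => -(PySem.Str.len w)) (fun w => w) false with
    | [] => ""            -- unreachable under the guard (sorted of a nonempty list)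
    | m :: _ => m

-- ===== PRECONDITION & SPEC =====
def Spec_ReMax (s : String) (out : String) : Prop := out = ReMax_alt s
instance (s : String) (out : String) : Decidable (Spec_ReMax s out) := by unfold Spec_ReMax; infer_instance

-- ===== CLAIM (what is proved, stated in full; the proofs are below) =====
def Claim_equal_ReMax : Prop := ∀ (s : String), Dom_ReMax s → Spec_ReMax s (ReMax s)

-- ===== LEMMAS AND PROOFS =====

-- The strict "better word" order both programs optimise: longer, or same length and lexicographically smaller.
def ltW (a b : String) : Bool :=
  decide ((-(PySem.Str.len a) : Int) < -(PySem.Str.len b)) ||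
    (!decide ((-(PySem.Str.len b) : Int) < -(PySem.Str.len a)) && decide (a < b))

theorem ltW_iff (a b : String) :
    ltW a b = true ↔ (PySem.Str.len b < PySem.Str.len a ∨
      (¬ PySem.Str.len a < PySem.Str.len b ∧ a < b)) := by
  simp [ltW, neg_lt_neg_iff]

theorem ltW_irrefl (a : String) : ltW a a = false := by
  simp [ltW]

theorem ltW_asymm {a b : String} (h : ltW a b = true) : ltW b a = false := by
  rw [ltW_iff] at h
  rw [Bool.eq_false_iff, Ne, ltW_iff]
  rcases h with h | ⟨h1, h2⟩
  · rintro (h' | ⟨h1', _⟩) <;> omega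
  · rintro (h' | ⟨_, h2'⟩)
    · omega
    · exact absurd h2' (lt_asymm h2)

theorem nltW_trans {a b c : String} (hba : ltW b a = false) (hcb : ltW c b = false) :
    ltW c a = false := by
  rw [Bool.eq_false_iff, Ne, ltW_iff] at hba hcb ⊢
  push Not at hba hcb
  rintro (h | ⟨h1, h2⟩)
  · have := hba.1; have := hcb.1; omega
  · have h3 := hba.1; have h4 := hcb.1
    have hca : ¬ c < a := not_lt_of_ge (le_trans (le_of_not_gt (hba.2 (by omega)))
      (le_of_not_gt (hcb.2 (by omega))))
    exact hca h2

theorem nltW_antisymm {a b : String} (hab : ltW a b = false) (hba : ltW b a = false) :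
    a = b := by
  rw [Bool.eq_false_iff, Ne, ltW_iff] at hab hba
  push Not at hab hba
  have h1 := hab.1; have h2 := hba.1
  exact le_antisymm (le_of_not_gt (hba.2 (by omega))) (le_of_not_gt (hab.2 (by omega)))

-- A's loop body is exactly "replace the accumulator when the new word is better".
theorem Abody_eq (mx i : String) :
    (if PySem.Str.len i > PySem.Str.len mx then i
     else if PySem.Str.len i = PySem.Str.len mx then (if i < mx then i else mx)
     else mx) = (if ltW i mx then i else mx) := by
  rcases lt_trichotomy (PySem.Str.len i) (PySem.Str.len mx) with h | h | h
  · rw [if_neg (by omega), if_neg (by omega), if_neg]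
    rw [Bool.not_eq_true, Bool.eq_false_iff, Ne, ltW_iff]
    rintro (h' | ⟨h1, _⟩) <;> omega
  · rw [if_neg (by omega), if_pos h]
    by_cases hlt : i < mx
    · rw [if_pos hlt, if_pos (by rw [ltW_iff]; exact Or.inr ⟨by omega, hlt⟩)]
    · rw [if_neg hlt, if_neg]
      rw [Bool.not_eq_true, Bool.eq_false_iff, Ne, ltW_iff]
      rintro (h' | ⟨_, h2⟩)
      · omega
      · exact hlt h2
  · rw [if_pos (by omega), if_pos (by rw [ltW_iff]; exact Or.inl h)]

-- The fold computes a member of acc :: ws that no element of acc :: ws beats.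
theorem fold_min (ws : List String) : ∀ acc : String,
    (ws.foldl (fun mx i => if ltW i mx then i else mx) acc = acc ∨
      ws.foldl (fun mx i => if ltW i mx then i else mx) acc ∈ ws) ∧
    ltW acc (ws.foldl (fun mx i => if ltW i mx then i else mx) acc) = false ∧
    ∀ y ∈ ws, ltW y (ws.foldl (fun mx i => if ltW i mx then i else mx) acc) = false := by
  induction ws with
  | nil => intro acc; exact ⟨Or.inl rfl, ltW_irrefl acc, by simp⟩
  | cons w t ih =>
    intro acc
    simp only [List.foldl_cons]
    by_cases h : ltW w acc = true
    · rw [if_pos h]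
      obtain ⟨hm, hacc, hall⟩ := ih w
      refine ⟨?_, ?_, ?_⟩
      · rcases hm with hm | hm
        · exact Or.inr (by rw [hm]; exact List.mem_cons_self)
        · exact Or.inr (List.mem_cons_of_mem _ hm)
      · exact nltW_trans hacc (ltW_asymm h)
      · intro y hy
        rcases List.mem_cons.mp hy with rfl | hy
        · exact hacc
        · exact hall y hy
    · rw [if_neg h]
      rw [Bool.not_eq_true] at h
      obtain ⟨hm, hacc, hall⟩ := ih acc
      refine ⟨?_, hacc, ?_⟩
      · rcases hm with hm | hm
        · exact Or.inl hm
        · exact Or.inr (List.mem_cons_of_mem _ hm)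
      · intro y hy
        rcases List.mem_cons.mp hy with rfl | hy
        · exact nltW_trans hacc h
        · exact hall y hy

-- insertBy preserves "no later element beats an earlier one".
theorem pairwise_insertBy (x : String) (l : List String)
    (h : l.Pairwise (fun a b => ltW b a = false)) :
    (PySem.List.insertBy ltW x l).Pairwise (fun a b => ltW b a = false) := by
  induction l with
  | nil => simp [PySem.List.insertBy]
  | cons y ys ih =>
    rcases List.pairwise_cons.mp h with ⟨hy, hys⟩
    by_cases hb : ltW x y = true
    · rw [show PySem.List.insertBy ltW x (y :: ys) = x :: y :: ys by
        simp [PySem.List.insertBy, hb]]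
      refine List.pairwise_cons.mpr ⟨?_, h⟩
      intro z hz
      rcases List.mem_cons.mp hz with rfl | hz
      · exact ltW_asymm hb
      · exact nltW_trans (ltW_asymm hb) (hy z hz)
    · rw [Bool.not_eq_true] at hb
      rw [show PySem.List.insertBy ltW x (y :: ys) = y :: PySem.List.insertBy ltW x ys by
        simp [PySem.List.insertBy, hb]]
      refine List.pairwise_cons.mpr ⟨?_, ih hys⟩
      intro z hz
      rcases (PySem.List.mem_insertBy ltW x z ys).mp hz with rfl | hz
      · exact hb
      · exact hy z hz

theorem pairwise_sortfold (ws : List String) : ∀ acc : List String,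
    acc.Pairwise (fun a b => ltW b a = false) →
    (ws.foldl (fun acc x => PySem.List.insertBy ltW x acc) acc).Pairwise
      (fun a b => ltW b a = false) := by
  induction ws with
  | nil => intro acc h; simpa using h
  | cons w t ih =>
    intro acc h
    simp only [List.foldl_cons]
    exact ih _ (pairwise_insertBy w acc h)

theorem sorted2_eq (ws : List String) :
    PySem.List.sorted2 ws (fun w => -(PySem.Str.len w)) (fun w => w) false =
      ws.foldl (fun acc x => PySem.List.insertBy ltW x acc) [] := rfl

-- every word produced by str.split() is nonempty
theorem split_go_ne_nil : ∀ (s cur : List Char) (acc : List (List Char)),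
    (∀ a ∈ acc, a ≠ ([] : List Char)) →
    ∀ w ∈ PySem.Chars.split₀.go s cur acc, w ≠ [] := by
  intro s
  induction s with
  | nil =>
    intro cur acc hacc w hw
    by_cases hc : cur.isEmpty
    · rw [show PySem.Chars.split₀.go [] cur acc = acc.reverse by
        simp [PySem.Chars.split₀.go, hc]] at hw
      exact hacc w (List.mem_reverse.mp hw)
    · rw [show PySem.Chars.split₀.go [] cur acc = (cur.reverse :: acc).reverse by
        simp [PySem.Chars.split₀.go]; intro hh
        exact absurd ((List.isEmpty_iff).mpr hh) hc] at hw
      rcases List.mem_cons.mp (List.mem_reverse.mp hw) with rfl | hw'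
      · simpa [List.isEmpty_iff] using hc
      · exact hacc w hw'
  | cons c rest ih =>
    intro cur acc hacc w hw
    by_cases hsp : PySem.Chars.isspace c = true
    · by_cases hc : cur.isEmpty
      · rw [show PySem.Chars.split₀.go (c :: rest) cur acc =
            PySem.Chars.split₀.go rest [] acc by
          simp [PySem.Chars.split₀.go, hsp, hc]] at hw
        exact ih [] acc hacc w hw
      · rw [show PySem.Chars.split₀.go (c :: rest) cur acc =
            PySem.Chars.split₀.go rest [] (cur.reverse :: acc) by
          simp [PySem.Chars.split₀.go, hsp]; intro hh
          exact absurd ((List.isEmpty_iff).mpr hh) hc] at hw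
        refine ih [] (cur.reverse :: acc) ?_ w hw
        intro a ha
        rcases List.mem_cons.mp ha with rfl | ha
        · simpa [List.isEmpty_iff] using hc
        · exact hacc a ha
    · rw [show PySem.Chars.split₀.go (c :: rest) cur acc =
          PySem.Chars.split₀.go rest (c :: cur) acc by
        simp [PySem.Chars.split₀.go, hsp]] at hw
      exact ih (c :: cur) acc hacc w hw

theorem words_pos (s : String) : ∀ w ∈ PySem.Str.split₀ s, 0 < PySem.Str.len w := by
  intro w hw
  simp only [PySem.Str.split₀, List.mem_map] at hw
  obtain ⟨l, hl, rfl⟩ := hw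
  have hne : l ≠ [] :=
    split_go_ne_nil s.toList [] [] (by simp) l (by simpa [PySem.Chars.split₀] using hl)
  rw [PySem.Str.len_eq]
  have : (String.ofList l).toList = l := by simp
  rw [this]
  exact_mod_cast Nat.pos_of_ne_zero (fun h => hne (List.eq_nil_of_length_eq_zero h))

theorem ltW_empty {w : String} (h : 0 < PySem.Str.len w) : ltW w "" = true := by
  rw [ltW_iff]
  left
  have : PySem.Str.len "" = 0 := by simp [PySem.Str.len_eq]
  omega

-- ===== VERDICT (by name: the statement is the Claim_ definition above) =====
theorem ReMax_spec : Claim_equal_ReMax := by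
  intro s _
  unfold Spec_ReMax ReMax ReMax_alt
  simp only []
  rcases hws : PySem.Str.split₀ s with _ | ⟨w0, t0⟩
  · simp
  · rw [if_neg (by simp)]
    -- rewrite A's body
    have hbody : (fun mx i => if PySem.Str.len i > PySem.Str.len mx then i
        else if PySem.Str.len i = PySem.Str.len mx then (if i < mx then i else mx)
        else mx) = (fun mx i => if ltW i mx then i else mx) := by
      funext mx i; exact Abody_eq mx i
    rw [hbody]
    -- the fold result
    obtain ⟨hmem, -, hall⟩ := fold_min (w0 :: t0) ""
    set r := (w0 :: t0).foldl (fun mx i => if ltW i mx then i else mx) "" with hr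
    have hwpos : ∀ w ∈ (w0 :: t0 : List String), 0 < PySem.Str.len w := by
      intro w hw; exact words_pos s w (hws ▸ hw)
    have hrmem : r ∈ (w0 :: t0 : List String) := by
      rcases hmem with hm | hm
      · exfalso
        have := hall w0 List.mem_cons_self
        rw [hm] at this
        rw [ltW_empty (hwpos w0 List.mem_cons_self)] at this
        exact Bool.true_eq_false.mp this
      · exact hm
    -- the sorted head
    have hperm := PySem.List.sorted2_perm (w0 :: t0) (fun w => -(PySem.Str.len w))
      (fun w => w) false
    rcases hsort : PySem.List.sorted2 (w0 :: t0) (fun w => -(PySem.Str.len w))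
        (fun w => w) false with _ | ⟨m, ms⟩
    · exact absurd (hsort ▸ hperm).symm.eq_nil (by simp)
    · have hpw : (m :: ms).Pairwise (fun a b => ltW b a = false) := by
        rw [← hsort, sorted2_eq]
        exact pairwise_sortfold (w0 :: t0) [] (List.Pairwise.nil)
      have hmmin : ∀ y ∈ (w0 :: t0 : List String), ltW y m = false := by
        intro y hy
        have hy' : y ∈ m :: ms := by
          rw [← hsort]; exact hperm.symm.subset hy
        rcases List.mem_cons.mp hy' with rfl | hy'
        · exact ltW_irrefl y
        · exact (List.pairwise_cons.mp hpw).1 y hy'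
      have hmmem : m ∈ (w0 :: t0 : List String) := by
        have : m ∈ m :: ms := List.mem_cons_self
        rw [← hsort] at this
        exact hperm.subset this
      exact nltW_antisymm (hmmin r hrmem) (hall m hmmem)
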